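-- pv_equiv track=rewrite | github.com/MarkoZdilar/Graph_Algorithms-Python | Vj4/zdilar_marko_4_1.py | adjacency_matrix_from_list
-- ===== SOURCE A (Python) =====
-- def adjacency_matrix_from_list(adjacency_list):
--     num_vertices = len(adjacency_list)
--     adjacency_matrix = [[0 for _ in range(num_vertices)] for _ in range(num_vertices)]
--     label_to_index = {label: i for i, label in enumerate(adjacency_list.keys())}
--
--     for vertex, neighbors in adjacency_list.items():
--         for neighbor in neighbors:
--             i, j = label_to_index[vertex], label_to_index[neighbor]
--             adjacency_matrix[i][j] = 1
--             adjacency_matrix[j][i] = 1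
--
--     return adjacency_matrix
-- ===== SOURCE B (Python) =====
-- def adjacency_matrix_from_list(adjacency_list):
--     index = {label: i for i, label in enumerate(adjacency_list)}
--     out_cols = [set(index[nb] for nb in nbrs) for nbrs in adjacency_list.values()]
--     n = len(out_cols)
--     return [[1 if j in out_cols[i] or i in out_cols[j] else 0
--              for j in range(n)] for i in range(n)]
-- ===== Notes on version B (the rewrite author's own statement) =====
-- stated objective: alternative
-- what changed: A builds a label->index map and mutates a pre-allocated zero matrix once per directed edge, writing both orientations; B never mutates a matrix: it maps each neighbor list to a set of column indices (out_cols) and renders every cell independently with the symmetric closed-form test 'j in out_cols[i] or i in out_cols[j]'.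
import Mathlib
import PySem

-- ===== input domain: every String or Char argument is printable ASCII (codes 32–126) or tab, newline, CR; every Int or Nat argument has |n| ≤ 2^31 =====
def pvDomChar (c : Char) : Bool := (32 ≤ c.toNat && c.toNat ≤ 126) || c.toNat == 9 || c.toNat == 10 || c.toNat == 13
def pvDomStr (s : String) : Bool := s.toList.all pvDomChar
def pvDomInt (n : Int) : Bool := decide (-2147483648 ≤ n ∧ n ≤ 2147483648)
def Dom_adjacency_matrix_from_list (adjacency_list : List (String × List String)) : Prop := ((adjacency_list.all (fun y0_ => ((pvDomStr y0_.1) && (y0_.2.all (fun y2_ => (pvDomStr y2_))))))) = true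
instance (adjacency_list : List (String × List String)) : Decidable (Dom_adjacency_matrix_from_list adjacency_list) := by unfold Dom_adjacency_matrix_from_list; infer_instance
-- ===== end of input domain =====

-- B replaces A's per-edge mutation of a pre-allocated zero matrix by a mutation-free
-- construction: per-row out-neighbor column sets, then every cell rendered independently
-- with a symmetric membership test (alternative algorithm, same cost).

-- ===== PORT A =====
-- label_to_index = {label: i for i, label in enumerate(adjacency_list.keys())}
def amflLabelToIndex (adjacency_list : List (String × List String)) : PySem.Dict String Int :=
  (PySem.List.enumerate (adjacency_list.map (·.1)) 0).foldl
    (fun d p => d.insert p.2 p.1) PySem.Dict.empty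

-- adjacency_matrix[i][j] = 1   (i, j are in-range nonnegative here; Pre_ excludes KeyError only)
def amflSetCell (m : List (List Int)) (i j : Int) : List (List Int) :=
  PySem.List.pySetD m i (PySem.List.pySetD (PySem.List.pyGetD m i []) j 1)

def adjacency_matrix_from_list (adjacency_list : List (String × List String)) : List (List Int) :=
  let num_vertices : Int := adjacency_list.length
  let adjacency_matrix : List (List Int) :=
    (PySem.List.pyRange 0 num_vertices 1).map
      (fun _ => (PySem.List.pyRange 0 num_vertices 1).map (fun _ => (0 : Int)))
  let label_to_index := amflLabelToIndex adjacency_list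
  adjacency_list.foldl
    (fun m vn =>
      vn.2.foldl
        (fun m neighbor =>
          match label_to_index.get? vn.1, label_to_index.get? neighbor with
          | some i, some j => amflSetCell (amflSetCell m i j) j i
          | _, _ => m)  -- a missing key raises KeyError in Python; excluded by Pre_
        m)
    adjacency_matrix

-- ===== PORT B =====
-- index = {label: i for i, label in enumerate(adjacency_list)}
def amflAltIndex (adjacency_list : List (String × List String)) : PySem.Dict String Int :=
  (PySem.List.enumerate (adjacency_list.map (·.1)) 0).foldl
    (fun d p => d.insert p.2 p.1) PySem.Dict.empty

def adjacency_matrix_from_list_alt (adjacency_list : List (String × List String)) : List (List Int) :=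
  let index := amflAltIndex adjacency_list
  -- out_cols = [set(index[nb] for nb in nbrs) for nbrs in adjacency_list.values()]
  -- (a neighbor missing from index raises KeyError in Python; excluded by Pre_)
  let out_cols : List (PySem.Set Int) :=
    (adjacency_list.map (·.2)).map
      (fun nbrs => PySem.Set.ofList (nbrs.filterMap (fun nb => index.get? nb)))
  let n : Int := out_cols.length
  (PySem.List.pyRange 0 n 1).map (fun i =>
    (PySem.List.pyRange 0 n 1).map (fun j =>
      if j ∈ PySem.List.pyGetD out_cols i PySem.Set.empty
         ∨ i ∈ PySem.List.pyGetD out_cols j PySem.Set.empty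
      then (1 : Int) else 0))

-- ===== PRECONDITION & SPEC =====
-- Pre_ excludes (a) lists with duplicate keys, which do not represent any Python dict
-- (A's argument IS a dict, so such lists correspond to no input of A), and (b) inputs with
-- a neighbor that is not a key, on which A raises KeyError.
def Pre_adjacency_matrix_from_list (adjacency_list : List (String × List String)) : Prop :=
  (adjacency_list.map (·.1)).Nodup ∧
  ∀ p ∈ adjacency_list, ∀ nb ∈ p.2, nb ∈ adjacency_list.map (·.1)
instance (adjacency_list : List (String × List String)) : Decidable (Pre_adjacency_matrix_from_list adjacency_list) := by unfold Pre_adjacency_matrix_from_list; infer_instance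

def pvWitness_adjacency_matrix_from_list : (List (String × List String)) :=
  [("a", ["b"]), ("b", ["a", "b"])]

def Spec_adjacency_matrix_from_list (adjacency_list : List (String × List String)) (out : List (List Int)) : Prop := out = adjacency_matrix_from_list_alt adjacency_list
instance (adjacency_list : List (String × List String)) (out : List (List Int)) : Decidable (Spec_adjacency_matrix_from_list adjacency_list out) := by unfold Spec_adjacency_matrix_from_list; infer_instance

-- ===== CLAIM (what is proved, stated in full; the proofs are below) =====
def Claim_equal_adjacency_matrix_from_list : Prop := ∀ (adjacency_list : List (String × List String)), Dom_adjacency_matrix_from_list adjacency_list → Pre_adjacency_matrix_from_list adjacency_list → Spec_adjacency_matrix_from_list adjacency_list (adjacency_matrix_from_list adjacency_list)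

-- ===== LEMMAS AND PROOFS =====

-- the set of symmetric index pairs A's loop writes 1 into (proof-side object only)
def amflE (adjacency_list : List (String × List String)) : PySem.Set (Int × Int) :=
  let lti := amflLabelToIndex adjacency_list
  adjacency_list.foldl
    (fun e vn =>
      vn.2.foldl
        (fun e nb =>
          match lti.get? vn.1, lti.get? nb with
          | some i, some j => PySem.Set.add (PySem.Set.add e (i, j)) (j, i)
          | _, _ => e)
        e)
      PySem.Set.empty

-- the matrix whose cell (i,j) is 1 exactly on a set of pairs
def amflRender (n : Int) (E : List (Int × Int)) : List (List Int) :=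
  (PySem.List.pyRange 0 n 1).map
    (fun i => (PySem.List.pyRange 0 n 1).map
      (fun j => if PySem.Set.contains E (i, j) then (1 : Int) else 0))

theorem amflContains_eq (s : List (Int × Int)) (x : Int × Int) :
    PySem.Set.contains s x = decide (x ∈ s) := by
  by_cases h : x ∈ s <;> simp [h]

theorem amflRender_empty (n : Int) :
    amflRender n PySem.Set.empty
      = (PySem.List.pyRange 0 n 1).map
          (fun _ => (PySem.List.pyRange 0 n 1).map (fun _ => (0 : Int))) := by
  simp [amflRender, PySem.Set.empty, PySem.Set.contains]

theorem amflSetCell_render (n : Int) (E : List (Int × Int)) (i j : Int)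
    (h0i : 0 ≤ i) (hin : i < n) (h0j : 0 ≤ j) (_hjn : j < n) :
    amflSetCell (amflRender n E) i j = amflRender n (PySem.Set.add E (i, j)) := by
  unfold amflSetCell amflRender
  rw [PySem.List.pyGetD_map_pyRange_of_nonneg _ n i _ h0i hin,
      PySem.List.pySetD_of_nonneg _ _ h0j, PySem.List.pySetD_of_nonneg _ _ h0i]
  apply List.ext_getElem
  · simp
  · intro k h1 h2
    simp only [List.length_set, List.length_map, PySem.List.length_pyRange_one] at h1 h2
    rw [List.getElem_set, List.getElem_map, List.getElem_map,
        PySem.List.getElem_pyRange_one]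
    by_cases hik : i.toNat = k
    · rw [if_pos hik]
      have hi' : (0 : Int) + (k : Int) = i := by omega
      rw [hi']
      apply List.ext_getElem
      · simp
      · intro l h3 h4
        simp only [List.length_set, List.length_map, PySem.List.length_pyRange_one] at h3 h4
        rw [List.getElem_set]
        by_cases hjl : j.toNat = l
        · rw [if_pos hjl, List.getElem_map, PySem.List.getElem_pyRange_one]
          have hj' : (0 : Int) + (l : Int) = j := by omega
          rw [hj', amflContains_eq]
          have hmem : (i, j) ∈ PySem.Set.add E (i, j) :=
            (PySem.Set.mem_add _ _ _).mpr (Or.inr rfl)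
          simp [hmem]
        · rw [if_neg hjl, List.getElem_map, List.getElem_map,
              PySem.List.getElem_pyRange_one, amflContains_eq, amflContains_eq]
          have hlj : (l : Int) ≠ j := by omega
          simp [PySem.Set.mem_add, hlj]
    · rw [if_neg hik]
      refine List.map_congr_left ?_
      intro l _
      rw [amflContains_eq, amflContains_eq]
      have hki : ¬ ((k : Int) = i) := by omega
      simp [PySem.Set.mem_add, hki]

theorem amflInner_eq (lti : PySem.Dict String Int) (n : Int)
    (hb : ∀ s i, lti.get? s = some i → 0 ≤ i ∧ i < n) (v : String) :
    ∀ (nbrs : List String) (E : List (Int × Int)),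
    nbrs.foldl
      (fun m neighbor =>
        match lti.get? v, lti.get? neighbor with
        | some i, some j => amflSetCell (amflSetCell m i j) j i
        | _, _ => m)
      (amflRender n E)
    = amflRender n
        (nbrs.foldl
          (fun e nb =>
            match lti.get? v, lti.get? nb with
            | some i, some j => PySem.Set.add (PySem.Set.add e (i, j)) (j, i)
            | _, _ => e)
          E) := by
  intro nbrs
  induction nbrs with
  | nil => intro E; rfl
  | cons nb t ih =>
    intro E
    simp only [List.foldl_cons]
    have hstep : (match lti.get? v, lti.get? nb with
        | some i, some j => amflSetCell (amflSetCell (amflRender n E) i j) j i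
        | _, _ => amflRender n E)
      = amflRender n (match lti.get? v, lti.get? nb with
        | some i, some j => PySem.Set.add (PySem.Set.add E (i, j)) (j, i)
        | _, _ => E) := by
      cases h1 : lti.get? v with
      | none => cases h2 : lti.get? nb <;> rfl
      | some i =>
        cases h2 : lti.get? nb with
        | none => rfl
        | some j =>
          obtain ⟨h0i, hin⟩ := hb v i h1
          obtain ⟨h0j, hjn⟩ := hb nb j h2
          simp only []
          rw [amflSetCell_render n E i j h0i hin h0j hjn,
              amflSetCell_render n _ j i h0j hjn h0i hin]
    rw [hstep]
    exact ih _

theorem amflLoop_eq (lti : PySem.Dict String Int) (n : Int)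
    (hb : ∀ s i, lti.get? s = some i → 0 ≤ i ∧ i < n)
    (l : List (String × List String)) (E : List (Int × Int)) :
    l.foldl
      (fun m vn =>
        vn.2.foldl
          (fun m neighbor =>
            match lti.get? vn.1, lti.get? neighbor with
            | some i, some j => amflSetCell (amflSetCell m i j) j i
            | _, _ => m)
          m)
      (amflRender n E)
    = amflRender n
        (l.foldl
          (fun e vn =>
            vn.2.foldl
              (fun e nb =>
                match lti.get? vn.1, lti.get? nb with
                | some i, some j => PySem.Set.add (PySem.Set.add e (i, j)) (j, i)
                | _, _ => e)
              e)
          E) := by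
  induction l generalizing E with
  | nil => rfl
  | cons vn t ih =>
    simp only [List.foldl_cons]
    rw [amflInner_eq lti n hb vn.1 vn.2 E]
    exact ih _

-- membership in the inner edge fold
theorem amflMemInner (lti : PySem.Dict String Int) (v : String) (a b : Int) :
    ∀ (nbrs : List String) (E : List (Int × Int)),
    ((a, b) ∈ nbrs.foldl
        (fun e nb =>
          match lti.get? v, lti.get? nb with
          | some i, some j => PySem.Set.add (PySem.Set.add e (i, j)) (j, i)
          | _, _ => e)
        E)
    ↔ (a, b) ∈ E ∨ ∃ nb ∈ nbrs, ∃ i j, lti.get? v = some i ∧ lti.get? nb = some j ∧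
        ((a, b) = (i, j) ∨ (a, b) = (j, i)) := by
  intro nbrs
  induction nbrs with
  | nil => intro E; simp
  | cons nb t ih =>
    intro E
    simp only [List.foldl_cons]
    rw [ih]
    cases h1 : lti.get? v with
    | none =>
      cases h2 : lti.get? nb with
      | none => simp
      | some j => simp
    | some i =>
      cases h2 : lti.get? nb with
      | none =>
        simp only []
        constructor
        · rintro (hE | ⟨nb', hnb', hrest⟩)
          · exact Or.inl hE
          · exact Or.inr ⟨nb', List.mem_cons_of_mem _ hnb', hrest⟩
        · rintro (hE | ⟨nb', hnb', i', j', hi', hj', hab⟩)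
          · exact Or.inl hE
          · rcases List.mem_cons.mp hnb' with rfl | hnb'
            · rw [h2] at hj'; exact absurd hj' (by simp)
            · exact Or.inr ⟨nb', hnb', i', j', hi', hj', hab⟩
      | some j =>
        simp only [PySem.Set.mem_add]
        constructor
        · rintro (((hE | h1') | h2') | ⟨nb', hnb', hrest⟩)
          · exact Or.inl hE
          · exact Or.inr ⟨nb, List.mem_cons_self, i, j, rfl, h2, Or.inl h1'⟩
          · exact Or.inr ⟨nb, List.mem_cons_self, i, j, rfl, h2, Or.inr h2'⟩
          · exact Or.inr ⟨nb', List.mem_cons_of_mem _ hnb', hrest⟩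
        · rintro (hE | ⟨nb', hnb', i', j', hi', hj', hab⟩)
          · exact Or.inl (Or.inl (Or.inl hE))
          · rcases List.mem_cons.mp hnb' with rfl | hnb'
            · rw [h2] at hj'
              cases hi'; cases hj'
              rcases hab with h | h
              · exact Or.inl (Or.inl (Or.inr h))
              · exact Or.inl (Or.inr h)
            · exact Or.inr ⟨nb', hnb', i', j', hi', hj', hab⟩

-- membership in the full edge fold
theorem amflMemE (lti : PySem.Dict String Int) (a b : Int) :
    ∀ (l : List (String × List String)) (E : List (Int × Int)),
    ((a, b) ∈ l.foldl
        (fun e vn =>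
          vn.2.foldl
            (fun e nb =>
              match lti.get? vn.1, lti.get? nb with
              | some i, some j => PySem.Set.add (PySem.Set.add e (i, j)) (j, i)
              | _, _ => e)
            e)
        E)
    ↔ (a, b) ∈ E ∨ ∃ p ∈ l, ∃ nb ∈ p.2, ∃ i j, lti.get? p.1 = some i ∧ lti.get? nb = some j ∧
        ((a, b) = (i, j) ∨ (a, b) = (j, i)) := by
  intro l
  induction l with
  | nil => intro E; simp
  | cons vn t ih =>
    intro E
    simp only [List.foldl_cons]
    rw [ih, amflMemInner]
    constructor
    · rintro ((hE | ⟨nb, hnb, hrest⟩) | ⟨p, hp, hrest⟩)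
      · exact Or.inl hE
      · exact Or.inr ⟨vn, List.mem_cons_self, nb, hnb, hrest⟩
      · exact Or.inr ⟨p, List.mem_cons_of_mem _ hp, hrest⟩
    · rintro (hE | ⟨p, hp, nb, hnb, hrest⟩)
      · exact Or.inl (Or.inl hE)
      · rcases List.mem_cons.mp hp with rfl | hp
        · exact Or.inl (Or.inr ⟨nb, hnb, hrest⟩)
        · exact Or.inr ⟨p, hp, nb, hnb, hrest⟩

-- the items of label_to_index under unique keys
theorem amflLti_items (al : List (String × List String))
    (hnd : (al.map (·.1)).Nodup) :
    (amflLabelToIndex al).items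
      = (PySem.List.enumerate (al.map (·.1)) 0).map (fun p => (p.2, p.1)) := by
  unfold amflLabelToIndex
  have h := PySem.Dict.items_foldl_insert_fresh
      (PySem.List.enumerate (al.map (·.1)) 0) (fun p => p.2) (fun p => p.1)
      PySem.Dict.empty
      (fun a _ => PySem.Dict.contains_empty _)
      (by rw [PySem.List.map_snd_enumerate]; exact hnd)
  simpa [PySem.Dict.empty] using h

theorem amflLti_keys (al : List (String × List String))
    (hnd : (al.map (·.1)).Nodup) :
    (amflLabelToIndex al).keys = al.map (·.1) := by
  show (amflLabelToIndex al).items.map (·.1) = al.map (·.1)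
  rw [amflLti_items al hnd, List.map_map]
  exact PySem.List.map_snd_enumerate (al.map (·.1)) 0

-- characterisation of label_to_index lookups under unique keys
theorem amflLti_some_iff (al : List (String × List String))
    (hnd : (al.map (·.1)).Nodup) (s : String) (i : Int) :
    (amflLabelToIndex al).get? s = some i
      ↔ ∃ (k : Nat) (h : k < al.length), (al.map (·.1))[k]'(by simpa using h) = s ∧ i = (k : Int) := by
  rw [PySem.Dict.get?_eq_some_iff_mem_items _ _ _ (by rw [amflLti_keys al hnd]; exact hnd),
      amflLti_items al hnd]
  constructor
  · intro h
    rcases List.mem_map.mp h with ⟨q, hq, hqe⟩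
    rcases (PySem.List.mem_enumerate_iff _ _ _).mp hq with ⟨k, hk, hqk⟩
    subst hqk
    simp only [Prod.mk.injEq] at hqe
    refine ⟨k, by simpa using hk, hqe.1, ?_⟩
    omega
  · rintro ⟨k, hk, hs, hi⟩
    refine List.mem_map.mpr ⟨((k : Int), (al.map (·.1))[k]'(by simpa using hk)), ?_, ?_⟩
    · exact (PySem.List.mem_enumerate_iff _ _ _).mpr ⟨k, by simpa using hk, by simp⟩
    · simp [hs, hi]

theorem amflLti_bound (al : List (String × List String))
    (hnd : (al.map (·.1)).Nodup) (s : String) (i : Int)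
    (h : (amflLabelToIndex al).get? s = some i) : 0 ≤ i ∧ i < al.length := by
  rcases (amflLti_some_iff al hnd s i).mp h with ⟨k, hk, _, hi⟩
  omega

theorem amflLti_at (al : List (String × List String))
    (hnd : (al.map (·.1)).Nodup) (k : Nat) (hk : k < al.length) :
    (amflLabelToIndex al).get? ((al.map (·.1))[k]'(by simpa using hk)) = some (k : Int) :=
  (amflLti_some_iff al hnd _ _).mpr ⟨k, hk, rfl, rfl⟩

-- a member of al with the key of position k IS al[k] (unique keys)
theorem amflMemUnique (al : List (String × List String))
    (hnd : (al.map (·.1)).Nodup) (p : String × List String) (hp : p ∈ al)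
    (k : Nat) (hk : k < al.length)
    (hkey : p.1 = (al.map (·.1))[k]'(by simpa using hk)) : p = al[k] := by
  rcases List.getElem_of_mem hp with ⟨m, hm, hpm⟩
  have hmap : (al.map (·.1))[m]'(by simpa using hm) = (al.map (·.1))[k]'(by simpa using hk) := by
    rw [List.getElem_map]
    rw [hpm, hkey]
  have : m = k := (hnd.getElem_inj_iff).mp hmap
  subst this
  exact hpm.symm

-- membership in B's k-th out-neighbour column set is membership in the k-th neighbour list
theorem amflOutCols_mem (al : List (String × List String))
    (hnd : (al.map (·.1)).Nodup) (ki kj : Nat)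
    (hki : ki < al.length) (hkj : kj < al.length) :
    (((kj : Nat) : Int) ∈ PySem.Set.ofList
        ((al[ki]).2.filterMap (fun nb => (amflLabelToIndex al).get? nb)))
      ↔ (al.map (·.1))[kj]'(by simpa using hkj) ∈ (al[ki]).2 := by
  rw [PySem.Set.mem_ofList, List.mem_filterMap]
  constructor
  · rintro ⟨nb, hnb, hsome⟩
    rcases (amflLti_some_iff al hnd nb _).mp hsome with ⟨k, hk, hkey, hval⟩
    have hkk : k = kj := by exact_mod_cast hval.symm
    subst hkk
    rw [hkey]
    exact hnb
  · intro h
    exact ⟨_, h, amflLti_at al hnd kj hkj⟩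

-- cell characterisation: (ki, kj) ∈ amflE al ↔ the symmetric membership predicate
theorem amflE_cell (al : List (String × List String))
    (hnd : (al.map (·.1)).Nodup)
    (ki kj : Nat) (hki : ki < al.length) (hkj : kj < al.length) :
    (((ki : Int), (kj : Int)) ∈ amflE al)
      ↔ ((al.map (·.1))[kj]'(by simpa using hkj) ∈ (al[ki]).2
         ∨ (al.map (·.1))[ki]'(by simpa using hki) ∈ (al[kj]).2) := by
  unfold amflE
  rw [amflMemE]
  constructor
  · rintro (h | ⟨p, hp, nb, hnb, i, j, hi, hj, hab⟩)
    · simp [PySem.Set.empty] at h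
    · rcases (amflLti_some_iff al hnd _ _).mp hi with ⟨kp, hkp, hpkey, rfl⟩
      rcases (amflLti_some_iff al hnd _ _).mp hj with ⟨kn, hkn, hnkey, rfl⟩
      rcases hab with hab | hab
      · have ha := congrArg Prod.fst hab
        have hb := congrArg Prod.snd hab
        simp only [] at ha hb
        have hkpk : kp = ki := by exact_mod_cast ha.symm
        have hknk : kn = kj := by exact_mod_cast hb.symm
        subst hkpk; subst hknk
        have hpeq : p = al[kp] := amflMemUnique al hnd p hp kp hkp hpkey.symm
        left
        rw [← hpeq, hnkey]
        exact hnb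
      · have ha := congrArg Prod.fst hab
        have hb := congrArg Prod.snd hab
        simp only [] at ha hb
        have hknk : kn = ki := by exact_mod_cast ha.symm
        have hkpk : kp = kj := by exact_mod_cast hb.symm
        subst hknk; subst hkpk
        have hpeq : p = al[kp] := amflMemUnique al hnd p hp kp hkp hpkey.symm
        right
        rw [← hpeq, hnkey]
        exact hnb
  · rintro (h | h)
    · refine Or.inr ⟨al[ki], List.getElem_mem hki, (al.map (·.1))[kj]'(by simpa using hkj), h,
        (ki : Int), (kj : Int), ?_, amflLti_at al hnd kj hkj, Or.inl rfl⟩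
      have : (al[ki]).1 = (al.map (·.1))[ki]'(by simpa using hki) := by simp
      rw [this]
      exact amflLti_at al hnd ki hki
    · refine Or.inr ⟨al[kj], List.getElem_mem hkj, (al.map (·.1))[ki]'(by simpa using hki), h,
        (kj : Int), (ki : Int), ?_, amflLti_at al hnd ki hki, Or.inr rfl⟩
      have : (al[kj]).1 = (al.map (·.1))[kj]'(by simpa using hkj) := by simp
      rw [this]
      exact amflLti_at al hnd kj hkj

-- ===== VERDICT (by name: the statement is the Claim_ definition above) =====
theorem adjacency_matrix_from_list_spec : Claim_equal_adjacency_matrix_from_list := by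
  intro al _ hpre
  obtain ⟨hnd, hcl⟩ := hpre
  unfold Spec_adjacency_matrix_from_list adjacency_matrix_from_list adjacency_matrix_from_list_alt
  simp only []
  rw [← amflRender_empty, amflLoop_eq (amflLabelToIndex al) (al.length)
        (fun s i h => amflLti_bound al hnd s i h)]
  show amflRender (al.length) (amflE al) = _
  unfold amflRender
  have hidx : amflAltIndex al = amflLabelToIndex al := rfl
  rw [hidx]
  have hlen : ((((al.map (·.2)).map
      (fun nbrs => PySem.Set.ofList (nbrs.filterMap
        (fun nb => (amflLabelToIndex al).get? nb)))).length : Nat) : Int) = (al.length : Int) := by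
    simp
  rw [hlen]
  refine List.map_congr_left ?_
  intro i hi
  obtain ⟨h0i, hin⟩ := PySem.List.mem_pyRange_one.mp hi
  refine List.map_congr_left ?_
  intro j hj
  obtain ⟨h0j, hjn⟩ := PySem.List.mem_pyRange_one.mp hj
  have hki : i.toNat < al.length := by omega
  have hkj : j.toNat < al.length := by omega
  have hgi : PySem.List.pyGetD ((al.map (·.2)).map
      (fun nbrs => PySem.Set.ofList (nbrs.filterMap
        (fun nb => (amflLabelToIndex al).get? nb)))) i PySem.Set.empty
      = PySem.Set.ofList ((al[i.toNat]).2.filterMap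
        (fun nb => (amflLabelToIndex al).get? nb)) := by
    rw [PySem.List.pyGetD_of_nonneg _ _ h0i, List.getD_eq_getElem?_getD,
        List.getElem?_eq_getElem (by simpa using hki)]
    simp
  have hgj : PySem.List.pyGetD ((al.map (·.2)).map
      (fun nbrs => PySem.Set.ofList (nbrs.filterMap
        (fun nb => (amflLabelToIndex al).get? nb)))) j PySem.Set.empty
      = PySem.Set.ofList ((al[j.toNat]).2.filterMap
        (fun nb => (amflLabelToIndex al).get? nb)) := by
    rw [PySem.List.pyGetD_of_nonneg _ _ h0j, List.getD_eq_getElem?_getD,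
        List.getElem?_eq_getElem (by simpa using hkj)]
    simp
  rw [amflContains_eq, hgi, hgj]
  have hpair : ((i, j) : Int × Int) = (((i.toNat : Nat) : Int), ((j.toNat : Nat) : Int)) := by
    rw [Prod.mk.injEq]
    exact ⟨by omega, by omega⟩
  rw [hpair]
  have hmj : (j ∈ PySem.Set.ofList ((al[i.toNat]).2.filterMap
      (fun nb => (amflLabelToIndex al).get? nb)))
      ↔ (al.map (·.1))[j.toNat]'(by simpa using hkj) ∈ (al[i.toNat]).2 := by
    have h := amflOutCols_mem al hnd i.toNat j.toNat hki hkj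
    rwa [show ((j.toNat : Nat) : Int) = j from by omega] at h
  have hmi : (i ∈ PySem.Set.ofList ((al[j.toNat]).2.filterMap
      (fun nb => (amflLabelToIndex al).get? nb)))
      ↔ (al.map (·.1))[i.toNat]'(by simpa using hki) ∈ (al[j.toNat]).2 := by
    have h := amflOutCols_mem al hnd j.toNat i.toNat hkj hki
    rwa [show ((i.toNat : Nat) : Int) = i from by omega] at h
  have hcell := amflE_cell al hnd i.toNat j.toNat hki hkj
  by_cases hc : (al.map (·.1))[j.toNat]'(by simpa using hkj) ∈ (al[i.toNat]).2
      ∨ (al.map (·.1))[i.toNat]'(by simpa using hki) ∈ (al[j.toNat]).2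
  · rw [if_pos ((or_congr hmj hmi).mpr hc), decide_eq_true (hcell.mpr hc)]
    rfl
  · rw [if_neg (fun h => hc ((or_congr hmj hmi).mp h)),
        decide_eq_false (fun m => hc (hcell.mp m))]
    rfl
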